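-- pv_equiv track=rewrite | github.com/Charlarthebar/ShortList.ai-archive | new_UI/backend/scoring_engine.py | _fuzzy_skill_match
-- ===== SOURCE A (Python) =====
-- def _fuzzy_skill_match(skill: str, candidate_skills: set) -> bool:
--     """Check for fuzzy skill matches (e.g., 'javascript' matches 'js')."""
--     skill_aliases = {
--         'javascript': ['js', 'ecmascript'],
--         'typescript': ['ts'],
--         'python': ['py'],
--         'react': ['reactjs', 'react.js'],
--         'node': ['nodejs', 'node.js'],
--         'postgres': ['postgresql', 'psql'],
--         'kubernetes': ['k8s'],
--         'amazon web services': ['aws'],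
--         'google cloud': ['gcp', 'google cloud platform'],
--         'machine learning': ['ml'],
--         'artificial intelligence': ['ai'],
--     }
--
--     # Check if skill is an alias
--     for main_skill, aliases in skill_aliases.items():
--         if skill == main_skill:
--             for alias in aliases:
--                 if alias in candidate_skills:
--                     return True
--         elif skill in aliases:
--             if main_skill in candidate_skills:
--                 return True
--             for alias in aliases:
--                 if alias in candidate_skills:
--                     return True
--
--     # Substring matching for common patterns
--     for candidate_skill in candidate_skills:
--         if skill in candidate_skill or candidate_skill in skill:
--             return True
--
--     return False
-- ===== SOURCE B (Python) =====
-- _SKILL_ALIASES = {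
--     'javascript': ['js', 'ecmascript'],
--     'typescript': ['ts'],
--     'python': ['py'],
--     'react': ['reactjs', 'react.js'],
--     'node': ['nodejs', 'node.js'],
--     'postgres': ['postgresql', 'psql'],
--     'kubernetes': ['k8s'],
--     'amazon web services': ['aws'],
--     'google cloud': ['gcp', 'google cloud platform'],
--     'machine learning': ['ml'],
--     'artificial intelligence': ['ai'],
-- }
--
-- # Inverted index, built once: main key -> its aliases; alias key -> main + aliases.
-- _INDEX = {}
-- for _main, _aliases in _SKILL_ALIASES.items():
--     _INDEX[_main] = _aliases
--     for _a in _aliases: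
--         _INDEX[_a] = [_main] + _aliases
--
--
-- def _fuzzy_skill_match(skill: str, candidate_skills: set) -> bool:
--     """Check for fuzzy skill matches (e.g., 'javascript' matches 'js')."""
--     targets = _INDEX.get(skill)
--     if targets is not None and any(t in candidate_skills for t in targets):
--         return True
--     return any(skill in c or c in skill for c in candidate_skills)
-- ===== Notes on version B (the rewrite author's own statement) =====
-- stated objective: alternative
-- what changed: B precomputes an inverted alias index (every main skill and every alias maps to its full target list) once at module level, replacing A's entry-by-entry scan of the alias dict with a single dict lookup, and folds the two substring tests into one any(...); the substring fallback is otherwise the same check.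
import Mathlib
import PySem

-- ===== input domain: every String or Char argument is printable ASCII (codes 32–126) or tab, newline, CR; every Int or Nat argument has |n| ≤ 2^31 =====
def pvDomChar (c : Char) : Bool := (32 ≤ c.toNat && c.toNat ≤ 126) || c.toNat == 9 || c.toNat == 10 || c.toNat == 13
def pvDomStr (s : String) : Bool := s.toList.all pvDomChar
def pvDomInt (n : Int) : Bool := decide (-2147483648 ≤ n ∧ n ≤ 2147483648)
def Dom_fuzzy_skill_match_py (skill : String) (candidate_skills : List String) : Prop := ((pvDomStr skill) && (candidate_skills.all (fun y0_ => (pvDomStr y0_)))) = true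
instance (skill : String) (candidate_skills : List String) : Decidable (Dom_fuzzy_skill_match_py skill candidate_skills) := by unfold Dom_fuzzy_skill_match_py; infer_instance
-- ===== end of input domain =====

-- B replaces A's entry-by-entry scan of the alias dict with an inverted index built
-- once (key → match targets) and a single dict lookup; return values are identical.

-- ===== PORT A =====
-- the alias table, in the source's insertion order
def pvAliasTable : List (String × List String) :=
  [("javascript", ["js", "ecmascript"]),
   ("typescript", ["ts"]),
   ("python", ["py"]),
   ("react", ["reactjs", "react.js"]),
   ("node", ["nodejs", "node.js"]),
   ("postgres", ["postgresql", "psql"]),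
   ("kubernetes", ["k8s"]),
   ("amazon web services", ["aws"]),
   ("google cloud", ["gcp", "google cloud platform"]),
   ("machine learning", ["ml"]),
   ("artificial intelligence", ["ai"])]

-- inner loop: 'for alias in aliases: if alias in candidate_skills: return True'
def pvAnyAliasIn : List String → List String → Bool
  | [], _ => false
  | a :: rest, cands => if cands.contains a then true else pvAnyAliasIn rest cands

-- trailing loop: substring matching over candidate_skills
def pvSubstrScan (skill : String) : List String → Bool
  | [] => false
  | c :: rest => if PySem.Str.isIn skill c || PySem.Str.isIn c skill then true else pvSubstrScan skill rest

-- main loop over skill_aliases.items()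
def pvAliasScan (skill : String) (cands : List String) : List (String × List String) → Bool
  | [] => false
  | (main, aliases) :: rest =>
    if skill = main then
      (if pvAnyAliasIn aliases cands then true else pvAliasScan skill cands rest)
    else if aliases.contains skill then
      (if cands.contains main then true
       else if pvAnyAliasIn aliases cands then true else pvAliasScan skill cands rest)
    else pvAliasScan skill cands rest

def fuzzy_skill_match_py (skill : String) (candidate_skills : List String) : Bool :=
  if pvAliasScan skill candidate_skills pvAliasTable then true
  else pvSubstrScan skill candidate_skills

-- ===== PORT B =====
-- inverted index built once from the table: main ↦ aliases, alias ↦ main :: aliases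
def pvIndex : PySem.Dict String (List String) :=
  pvAliasTable.foldl
    (fun d p => p.2.foldl (fun d a => d.insert a (p.1 :: p.2)) (d.insert p.1 p.2))
    PySem.Dict.empty

def fuzzy_skill_match_py_alt (skill : String) (candidate_skills : List String) : Bool :=
  let targets := pvIndex.get? skill
  if (match targets with
      | some ts => ts.any (fun t => candidate_skills.contains t)
      | none => false) then true
  else candidate_skills.any (fun c => PySem.Str.isIn skill c || PySem.Str.isIn c skill)

-- ===== PRECONDITION & SPEC =====
def Spec_fuzzy_skill_match_py (skill : String) (candidate_skills : List String) (out : Bool) : Prop := out = fuzzy_skill_match_py_alt skill candidate_skills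
instance (skill : String) (candidate_skills : List String) (out : Bool) : Decidable (Spec_fuzzy_skill_match_py skill candidate_skills out) := by unfold Spec_fuzzy_skill_match_py; infer_instance

-- ===== CLAIM (what is proved, stated in full; the proofs are below) =====
def Claim_equal_fuzzy_skill_match_py : Prop := ∀ (skill : String) (candidate_skills : List String), Dom_fuzzy_skill_match_py skill candidate_skills → Spec_fuzzy_skill_match_py skill candidate_skills (fuzzy_skill_match_py skill candidate_skills)

-- ===== LEMMAS AND PROOFS =====
-- the two hand-written early-return loops are boolean 'any's
theorem pvSubstrScan_eq_any (skill : String) (cs : List String) :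
    pvSubstrScan skill cs = cs.any (fun c => PySem.Str.isIn skill c || PySem.Str.isIn c skill) := by
  induction cs with
  | nil => rfl
  | cons c rest ih =>
      simp only [pvSubstrScan, List.any_cons, ih]
      cases h : (PySem.Str.isIn skill c || PySem.Str.isIn c skill) <;> simp

theorem pvAnyAliasIn_eq_any (as cands : List String) :
    pvAnyAliasIn as cands = as.any (fun a => cands.contains a) := by
  induction as with
  | nil => rfl
  | cons a rest ih =>
      simp only [pvAnyAliasIn, List.any_cons, ih]
      cases h : cands.contains a <;> simp

-- ===== VERDICT (by name: the statement is the Claim_ definition above) =====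
theorem fuzzy_skill_match_py_spec : Claim_equal_fuzzy_skill_match_py := by
  intro skill candidate_skills _
  unfold Spec_fuzzy_skill_match_py
  by_cases h0 : skill = "javascript"
  · subst h0
    have hk : pvIndex.get? "javascript" = some ["js", "ecmascript"] := by decide
    simp [fuzzy_skill_match_py, fuzzy_skill_match_py_alt, pvAliasTable, pvAliasScan, pvAnyAliasIn_eq_any, pvSubstrScan_eq_any, hk]
  by_cases h1 : skill = "js"
  · subst h1
    have hk : pvIndex.get? "js" = some ["javascript", "js", "ecmascript"] := by decide
    simp [fuzzy_skill_match_py, fuzzy_skill_match_py_alt, pvAliasTable, pvAliasScan, pvAnyAliasIn_eq_any, pvSubstrScan_eq_any, hk]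
  by_cases h2 : skill = "ecmascript"
  · subst h2
    have hk : pvIndex.get? "ecmascript" = some ["javascript", "js", "ecmascript"] := by decide
    simp [fuzzy_skill_match_py, fuzzy_skill_match_py_alt, pvAliasTable, pvAliasScan, pvAnyAliasIn_eq_any, pvSubstrScan_eq_any, hk]
  by_cases h3 : skill = "typescript"
  · subst h3
    have hk : pvIndex.get? "typescript" = some ["ts"] := by decide
    simp [fuzzy_skill_match_py, fuzzy_skill_match_py_alt, pvAliasTable, pvAliasScan, pvAnyAliasIn_eq_any, pvSubstrScan_eq_any, hk]
  by_cases h4 : skill = "ts"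
  · subst h4
    have hk : pvIndex.get? "ts" = some ["typescript", "ts"] := by decide
    simp [fuzzy_skill_match_py, fuzzy_skill_match_py_alt, pvAliasTable, pvAliasScan, pvAnyAliasIn_eq_any, pvSubstrScan_eq_any, hk]
  by_cases h5 : skill = "python"
  · subst h5
    have hk : pvIndex.get? "python" = some ["py"] := by decide
    simp [fuzzy_skill_match_py, fuzzy_skill_match_py_alt, pvAliasTable, pvAliasScan, pvAnyAliasIn_eq_any, pvSubstrScan_eq_any, hk]
  by_cases h6 : skill = "py"
  · subst h6
    have hk : pvIndex.get? "py" = some ["python", "py"] := by decide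
    simp [fuzzy_skill_match_py, fuzzy_skill_match_py_alt, pvAliasTable, pvAliasScan, pvAnyAliasIn_eq_any, pvSubstrScan_eq_any, hk]
  by_cases h7 : skill = "react"
  · subst h7
    have hk : pvIndex.get? "react" = some ["reactjs", "react.js"] := by decide
    simp [fuzzy_skill_match_py, fuzzy_skill_match_py_alt, pvAliasTable, pvAliasScan, pvAnyAliasIn_eq_any, pvSubstrScan_eq_any, hk]
  by_cases h8 : skill = "reactjs"
  · subst h8
    have hk : pvIndex.get? "reactjs" = some ["react", "reactjs", "react.js"] := by decide
    simp [fuzzy_skill_match_py, fuzzy_skill_match_py_alt, pvAliasTable, pvAliasScan, pvAnyAliasIn_eq_any, pvSubstrScan_eq_any, hk]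
  by_cases h9 : skill = "react.js"
  · subst h9
    have hk : pvIndex.get? "react.js" = some ["react", "reactjs", "react.js"] := by decide
    simp [fuzzy_skill_match_py, fuzzy_skill_match_py_alt, pvAliasTable, pvAliasScan, pvAnyAliasIn_eq_any, pvSubstrScan_eq_any, hk]
  by_cases h10 : skill = "node"
  · subst h10
    have hk : pvIndex.get? "node" = some ["nodejs", "node.js"] := by decide
    simp [fuzzy_skill_match_py, fuzzy_skill_match_py_alt, pvAliasTable, pvAliasScan, pvAnyAliasIn_eq_any, pvSubstrScan_eq_any, hk]
  by_cases h11 : skill = "nodejs"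
  · subst h11
    have hk : pvIndex.get? "nodejs" = some ["node", "nodejs", "node.js"] := by decide
    simp [fuzzy_skill_match_py, fuzzy_skill_match_py_alt, pvAliasTable, pvAliasScan, pvAnyAliasIn_eq_any, pvSubstrScan_eq_any, hk]
  by_cases h12 : skill = "node.js"
  · subst h12
    have hk : pvIndex.get? "node.js" = some ["node", "nodejs", "node.js"] := by decide
    simp [fuzzy_skill_match_py, fuzzy_skill_match_py_alt, pvAliasTable, pvAliasScan, pvAnyAliasIn_eq_any, pvSubstrScan_eq_any, hk]
  by_cases h13 : skill = "postgres"
  · subst h13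
    have hk : pvIndex.get? "postgres" = some ["postgresql", "psql"] := by decide
    simp [fuzzy_skill_match_py, fuzzy_skill_match_py_alt, pvAliasTable, pvAliasScan, pvAnyAliasIn_eq_any, pvSubstrScan_eq_any, hk]
  by_cases h14 : skill = "postgresql"
  · subst h14
    have hk : pvIndex.get? "postgresql" = some ["postgres", "postgresql", "psql"] := by decide
    simp [fuzzy_skill_match_py, fuzzy_skill_match_py_alt, pvAliasTable, pvAliasScan, pvAnyAliasIn_eq_any, pvSubstrScan_eq_any, hk]
  by_cases h15 : skill = "psql"
  · subst h15
    have hk : pvIndex.get? "psql" = some ["postgres", "postgresql", "psql"] := by decide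
    simp [fuzzy_skill_match_py, fuzzy_skill_match_py_alt, pvAliasTable, pvAliasScan, pvAnyAliasIn_eq_any, pvSubstrScan_eq_any, hk]
  by_cases h16 : skill = "kubernetes"
  · subst h16
    have hk : pvIndex.get? "kubernetes" = some ["k8s"] := by decide
    simp [fuzzy_skill_match_py, fuzzy_skill_match_py_alt, pvAliasTable, pvAliasScan, pvAnyAliasIn_eq_any, pvSubstrScan_eq_any, hk]
  by_cases h17 : skill = "k8s"
  · subst h17
    have hk : pvIndex.get? "k8s" = some ["kubernetes", "k8s"] := by decide
    simp [fuzzy_skill_match_py, fuzzy_skill_match_py_alt, pvAliasTable, pvAliasScan, pvAnyAliasIn_eq_any, pvSubstrScan_eq_any, hk]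
  by_cases h18 : skill = "amazon web services"
  · subst h18
    have hk : pvIndex.get? "amazon web services" = some ["aws"] := by decide
    simp [fuzzy_skill_match_py, fuzzy_skill_match_py_alt, pvAliasTable, pvAliasScan, pvAnyAliasIn_eq_any, pvSubstrScan_eq_any, hk]
  by_cases h19 : skill = "aws"
  · subst h19
    have hk : pvIndex.get? "aws" = some ["amazon web services", "aws"] := by decide
    simp [fuzzy_skill_match_py, fuzzy_skill_match_py_alt, pvAliasTable, pvAliasScan, pvAnyAliasIn_eq_any, pvSubstrScan_eq_any, hk]
  by_cases h20 : skill = "google cloud"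
  · subst h20
    have hk : pvIndex.get? "google cloud" = some ["gcp", "google cloud platform"] := by decide
    simp [fuzzy_skill_match_py, fuzzy_skill_match_py_alt, pvAliasTable, pvAliasScan, pvAnyAliasIn_eq_any, pvSubstrScan_eq_any, hk]
  by_cases h21 : skill = "gcp"
  · subst h21
    have hk : pvIndex.get? "gcp" = some ["google cloud", "gcp", "google cloud platform"] := by decide
    simp [fuzzy_skill_match_py, fuzzy_skill_match_py_alt, pvAliasTable, pvAliasScan, pvAnyAliasIn_eq_any, pvSubstrScan_eq_any, hk]
  by_cases h22 : skill = "google cloud platform"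
  · subst h22
    have hk : pvIndex.get? "google cloud platform" = some ["google cloud", "gcp", "google cloud platform"] := by decide
    simp [fuzzy_skill_match_py, fuzzy_skill_match_py_alt, pvAliasTable, pvAliasScan, pvAnyAliasIn_eq_any, pvSubstrScan_eq_any, hk]
  by_cases h23 : skill = "machine learning"
  · subst h23
    have hk : pvIndex.get? "machine learning" = some ["ml"] := by decide
    simp [fuzzy_skill_match_py, fuzzy_skill_match_py_alt, pvAliasTable, pvAliasScan, pvAnyAliasIn_eq_any, pvSubstrScan_eq_any, hk]
  by_cases h24 : skill = "ml"
  · subst h24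
    have hk : pvIndex.get? "ml" = some ["machine learning", "ml"] := by decide
    simp [fuzzy_skill_match_py, fuzzy_skill_match_py_alt, pvAliasTable, pvAliasScan, pvAnyAliasIn_eq_any, pvSubstrScan_eq_any, hk]
  by_cases h25 : skill = "artificial intelligence"
  · subst h25
    have hk : pvIndex.get? "artificial intelligence" = some ["ai"] := by decide
    simp [fuzzy_skill_match_py, fuzzy_skill_match_py_alt, pvAliasTable, pvAliasScan, pvAnyAliasIn_eq_any, pvSubstrScan_eq_any, hk]
  by_cases h26 : skill = "ai"
  · subst h26
    have hk : pvIndex.get? "ai" = some ["artificial intelligence", "ai"] := by decide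
    simp [fuzzy_skill_match_py, fuzzy_skill_match_py_alt, pvAliasTable, pvAliasScan, pvAnyAliasIn_eq_any, pvSubstrScan_eq_any, hk]
  have hk : pvIndex.get? skill = none := by
    rw [PySem.Dict.get?_eq_none_iff_not_mem_keys]
    have hkeys : pvIndex.keys = ["javascript", "js", "ecmascript", "typescript", "ts", "python", "py", "react", "reactjs", "react.js", "node", "nodejs", "node.js", "postgres", "postgresql", "psql", "kubernetes", "k8s", "amazon web services", "aws", "google cloud", "gcp", "google cloud platform", "machine learning", "ml", "artificial intelligence", "ai"] := by decide
    simp [hkeys, h0, h1, h2, h3, h4, h5, h6, h7, h8, h9, h10, h11, h12, h13, h14, h15, h16, h17, h18, h19, h20, h21, h22, h23, h24, h25, h26]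
  simp [fuzzy_skill_match_py, fuzzy_skill_match_py_alt, pvAliasTable, pvAliasScan, pvSubstrScan_eq_any, hk, h0, h1, h2, h3, h4, h5, h6, h7, h8, h9, h10, h11, h12, h13, h14, h15, h16, h17, h18, h19, h20, h21, h22, h23, h24, h25, h26]
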